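-- pv_equiv track=rewrite | github.com/Alcaher2007/PythonHomework | final_task/parser_split.py | conversion_signs
-- ===== SOURCE A (Python) =====
-- def conversion_signs(split_string):
--
--     """Замена знаков при близком расположении"""
--
--     i = 0
--     while i < len(split_string):
--         if split_string[i] == "-" and split_string[i+1] == "-":
--             split_string[i:i+2] = ["+"]
--             continue
--         elif split_string[i] == "+" and split_string[i+1] == "-":
--             split_string[i:i+2] = ["-"]
--             continue
--         else:
--             i += 1
--     return split_string
-- ===== SOURCE B (Python) =====
-- def conversion_signs(split_string):
--     """Single left-to-right pass: merge an incoming "-" with a trailing sign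
--     ("--" -> "+", "+-" -> "-") on a growing output list."""
--     out = []
--     for t in split_string:
--         if t == "-" and out and out[-1] == "-":
--             out[-1] = "+"
--         elif t == "-" and out and out[-1] == "+":
--             out[-1] = "-"
--         else:
--             out.append(t)
--     split_string[:] = out
--     return split_string
-- ===== Notes on version B (the rewrite author's own statement) =====
-- stated objective: alternative
-- what changed: Replaces A's in-place while-loop with cursor resets and quadratic slice-assignments by a single left-to-right pass that appends each token to an output list and merges an incoming "-" with a trailing sign in place.
import Mathlib
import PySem

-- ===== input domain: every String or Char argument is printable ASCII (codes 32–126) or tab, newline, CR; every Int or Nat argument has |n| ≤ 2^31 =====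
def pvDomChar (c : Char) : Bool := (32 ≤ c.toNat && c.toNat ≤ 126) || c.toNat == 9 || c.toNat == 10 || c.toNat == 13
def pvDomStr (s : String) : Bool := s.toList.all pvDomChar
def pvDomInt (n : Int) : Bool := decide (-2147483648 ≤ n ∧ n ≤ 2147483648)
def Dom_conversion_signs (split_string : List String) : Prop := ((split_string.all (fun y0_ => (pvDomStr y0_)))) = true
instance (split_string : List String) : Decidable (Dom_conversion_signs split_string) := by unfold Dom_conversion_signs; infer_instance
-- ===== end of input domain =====

-- B replaces A's quadratic in-place while-loop (slice-assignment + cursor reset) by a single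
-- left-to-right pass over a growing output list; A mutates its argument in place and B mimics
-- that in Python, but the equivalence proved here is about the return value only.


-- ===== PORT A =====
-- while i < len(s): merge "--"→"+" / "+-"→"-" at i (slice assignment, keep i) else i += 1.
-- s[i+1] out of range = IndexError; the port returns s there (never reached inside Pre_).
def conversionSignsGo (s : List String) (i : Nat) : List String :=
  if h : i < s.length then
    if s[i] = "-" then
      if h2 : i + 1 < s.length then
        if s[i+1] = "-" then
          conversionSignsGo (s.take i ++ "+" :: s.drop (i+2)) i
        else
          conversionSignsGo s (i+1)
      else s      -- IndexError on split_string[i+1]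
    else if s[i] = "+" then
      if h2 : i + 1 < s.length then
        if s[i+1] = "-" then
          conversionSignsGo (s.take i ++ "-" :: s.drop (i+2)) i
        else
          conversionSignsGo s (i+1)
      else s      -- IndexError on split_string[i+1]
    else
      conversionSignsGo s (i+1)
  else
    s
termination_by 2 * s.length - i
decreasing_by
  · have : (s.take i ++ "+" :: s.drop (i+2)).length = s.length - 1 := by
      simp [List.length_append, List.length_take, List.length_drop]; omega
    omega
  · omega
  · have : (s.take i ++ "-" :: s.drop (i+2)).length = s.length - 1 := by
      simp [List.length_append, List.length_take, List.length_drop]; omega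
    omega
  · omega
  · omega

def conversion_signs (split_string : List String) : List String :=
  conversionSignsGo split_string 0

-- ===== PORT B =====
-- one step of B's loop: append t, merging an incoming "-" with a trailing sign
def conversionSignsStep (out : List String) (t : String) : List String :=
  if t = "-" ∧ out.getLast? = some "-" then
    out.dropLast ++ ["+"]
  else if t = "-" ∧ out.getLast? = some "+" then
    out.dropLast ++ ["-"]
  else
    out ++ [t]

def conversion_signs_alt (split_string : List String) : List String :=
  split_string.foldl conversionSignsStep []

-- ===== PRECONDITION & SPEC =====
-- A evaluates split_string[i+1]; when the scan reaches the last position holding "+" or "-"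
-- this raises IndexError, so Pre_ excludes exactly the lists whose last token is "+" or "-".
def Pre_conversion_signs (split_string : List String) : Prop :=
  split_string.getLast? ≠ some "+" ∧ split_string.getLast? ≠ some "-"
instance (split_string : List String) : Decidable (Pre_conversion_signs split_string) := by
  unfold Pre_conversion_signs; infer_instance
def pvWitness_conversion_signs : List String := ["-", "-", "x"]

def Spec_conversion_signs (split_string : List String) (out : List String) : Prop := out = conversion_signs_alt split_string
instance (split_string : List String) (out : List String) : Decidable (Spec_conversion_signs split_string out) := by unfold Spec_conversion_signs; infer_instance

-- ===== CLAIM (what is proved, stated in full; the proofs are below) =====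
def Claim_equal_conversion_signs : Prop := ∀ (split_string : List String), Dom_conversion_signs split_string → Pre_conversion_signs split_string → Spec_conversion_signs split_string (conversion_signs split_string)
-- ===== LEMMAS AND PROOFS =====

-- A is local: it never looks left of the cursor.
theorem conversionSignsGo_cons_aux : ∀ (n : Nat) (r : List String) (i : Nat) (t : String),
    2 * r.length - i ≤ n → conversionSignsGo (t :: r) (i + 1) = t :: conversionSignsGo r i := by
  intro n
  induction n with
  | zero =>
    intro r i t h
    have hi : ¬ i < r.length := by omega
    have hR : conversionSignsGo r i = r := by rw [conversionSignsGo]; simp [hi]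
    rw [hR, conversionSignsGo]; simp [hi]
  | succ n ih =>
    intro r i t h
    by_cases hi : i < r.length
    · have e1 : (t :: r)[i+1]'(by simpa using hi) = r[i] := List.getElem_cons_succ ..
      by_cases h2 : i + 1 < r.length
      · have e2 : (t :: r)[i+1+1]'(by simpa using h2) = r[i+1] := List.getElem_cons_succ ..
        by_cases hm : r[i] = "-"
        · by_cases hu : r[i+1] = "-"
          · have hR : conversionSignsGo r i
                = conversionSignsGo (r.take i ++ "+" :: r.drop (i+2)) i := by
              conv_lhs => rw [conversionSignsGo]
              simp [hi, h2, hm, hu]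
            have hL : conversionSignsGo (t :: r) (i + 1)
                = conversionSignsGo (t :: (r.take i ++ "+" :: r.drop (i+2))) (i + 1) := by
              conv_lhs => rw [conversionSignsGo]
              simp [hi, h2, hm, hu, e1, e2,
                show List.drop (i+1+2) (t :: r) = List.drop (i+2) r from rfl]
            rw [hL, hR]
            apply ih
            have : (r.take i ++ "+" :: r.drop (i+2)).length = r.length - 1 := by
              simp [List.length_append, List.length_take, List.length_drop]; omega
            omega
          · have hR : conversionSignsGo r i = conversionSignsGo r (i+1) := by
              conv_lhs => rw [conversionSignsGo]
              simp [hi, h2, hm, hu]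
            have hL : conversionSignsGo (t :: r) (i + 1)
                = conversionSignsGo (t :: r) (i + 1 + 1) := by
              conv_lhs => rw [conversionSignsGo]
              simp [hi, h2, hm, hu, e1, e2]
            rw [hL, hR]
            exact ih r (i+1) t (by omega)
        · by_cases hp : r[i] = "+"
          · by_cases hu : r[i+1] = "-"
            · have hR : conversionSignsGo r i
                  = conversionSignsGo (r.take i ++ "-" :: r.drop (i+2)) i := by
                conv_lhs => rw [conversionSignsGo]
                simp [hi, h2, hp, hu]
              have hL : conversionSignsGo (t :: r) (i + 1)
                  = conversionSignsGo (t :: (r.take i ++ "-" :: r.drop (i+2))) (i + 1) := by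
                conv_lhs => rw [conversionSignsGo]
                simp [hi, h2, hp, hu, e1, e2,
                  show List.drop (i+1+2) (t :: r) = List.drop (i+2) r from rfl]
              rw [hL, hR]
              apply ih
              have : (r.take i ++ "-" :: r.drop (i+2)).length = r.length - 1 := by
                simp [List.length_append, List.length_take, List.length_drop]; omega
              omega
            · have hR : conversionSignsGo r i = conversionSignsGo r (i+1) := by
                conv_lhs => rw [conversionSignsGo]
                simp [hi, h2, hp, hu]
              have hL : conversionSignsGo (t :: r) (i + 1)
                  = conversionSignsGo (t :: r) (i + 1 + 1) := by
                conv_lhs => rw [conversionSignsGo]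
                simp [hi, h2, hp, hu, e1, e2]
              rw [hL, hR]
              exact ih r (i+1) t (by omega)
          · have hR : conversionSignsGo r i = conversionSignsGo r (i+1) := by
              conv_lhs => rw [conversionSignsGo]
              simp [hi, hm, hp]
            have hL : conversionSignsGo (t :: r) (i + 1)
                = conversionSignsGo (t :: r) (i + 1 + 1) := by
              conv_lhs => rw [conversionSignsGo]
              simp [hi, hm, hp, e1]
            rw [hL, hR]
            exact ih r (i+1) t (by omega)
      · -- i is the last index: A raises IndexError unless r[i] is not a sign
        by_cases hm : r[i] = "-"
        · have hR : conversionSignsGo r i = r := by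
            conv_lhs => rw [conversionSignsGo]
            simp [hi, h2, hm]
          have hL : conversionSignsGo (t :: r) (i + 1) = t :: r := by
            conv_lhs => rw [conversionSignsGo]
            simp [hi, h2, hm, e1]
          rw [hL, hR]
        · by_cases hp : r[i] = "+"
          · have hR : conversionSignsGo r i = r := by
              conv_lhs => rw [conversionSignsGo]
              simp [hi, h2, hp]
            have hL : conversionSignsGo (t :: r) (i + 1) = t :: r := by
              conv_lhs => rw [conversionSignsGo]
              simp [hi, h2, hp, e1]
            rw [hL, hR]
          · have hR : conversionSignsGo r i = conversionSignsGo r (i+1) := by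
              conv_lhs => rw [conversionSignsGo]
              simp [hi, hm, hp]
            have hL : conversionSignsGo (t :: r) (i + 1)
                = conversionSignsGo (t :: r) (i + 1 + 1) := by
              conv_lhs => rw [conversionSignsGo]
              simp [hi, hm, hp, e1]
            rw [hL, hR]
            exact ih r (i+1) t (by omega)
    · have hR : conversionSignsGo r i = r := by rw [conversionSignsGo]; simp [hi]
      rw [hR, conversionSignsGo]; simp [hi]

theorem conversionSignsGo_cons (t : String) (r : List String) (i : Nat) :
    conversionSignsGo (t :: r) (i + 1) = t :: conversionSignsGo r i :=
  conversionSignsGo_cons_aux (2 * r.length - i) r i t (Nat.le_refl _)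

-- B's step ignores everything left of a nonempty suffix.
theorem conversionSignsStep_append (o x : List String) (t : String) (hx : x ≠ []) :
    conversionSignsStep (o ++ x) t = o ++ conversionSignsStep x t := by
  unfold conversionSignsStep
  rw [List.getLast?_append_of_ne_nil o hx, List.dropLast_append]
  split_ifs <;> simp_all [List.append_assoc]

theorem conversionSignsStep_ne_nil (x : List String) (t : String) (_hx : x ≠ []) :
    conversionSignsStep x t ≠ [] := by
  unfold conversionSignsStep
  split_ifs <;> simp

theorem foldl_conversionSignsStep_append (r : List String) (o x : List String) (hx : x ≠ []) :
    r.foldl conversionSignsStep (o ++ x) = o ++ r.foldl conversionSignsStep x := by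
  induction r generalizing x with
  | nil => rfl
  | cons t r ih =>
    simp only [List.foldl_cons, conversionSignsStep_append o x t hx]
    exact ih _ (conversionSignsStep_ne_nil x t hx)

theorem conversionSignsStep_nil (t : String) : conversionSignsStep [] t = [t] := by
  unfold conversionSignsStep; simp

theorem conversionSigns_main_aux : ∀ (n : Nat) (r : List String), r.length ≤ n →
    Pre_conversion_signs r → conversionSignsGo r 0 = r.foldl conversionSignsStep [] := by
  intro n
  induction n with
  | zero =>
    intro r h _
    have : r = [] := List.eq_nil_of_length_eq_zero (by omega)
    subst this
    rw [conversionSignsGo]; simp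
  | succ n ih =>
    intro r h hp
    match r with
    | [] => rw [conversionSignsGo]; simp
    | [t] =>
      have ht1 : t ≠ "+" := fun e => hp.1 (by simp [e])
      have ht2 : t ≠ "-" := fun e => hp.2 (by simp [e])
      have h1 : conversionSignsGo [t] 1 = [t] := by rw [conversionSignsGo]; simp
      rw [conversionSignsGo]
      simp [ht1, ht2, h1, conversionSignsStep]
    | t :: u :: r' =>
      have hp' : Pre_conversion_signs (u :: r') := by
        unfold Pre_conversion_signs at hp ⊢
        rwa [List.getLast?_cons_cons] at hp
      by_cases hu : u = "-"
      · by_cases ht : t = "-"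
        · -- "--" collapses to "+"
          subst ht; subst hu
          have hr' : r' ≠ [] := by
            intro e; subst e
            exact hp.2 (by simp)
          obtain ⟨v, r'', rfl⟩ := List.exists_cons_of_ne_nil hr'
          have hp'' : Pre_conversion_signs ("+" :: v :: r'') := by
            unfold Pre_conversion_signs at hp' ⊢
            rwa [List.getLast?_cons_cons] at hp' ⊢
          have hA : conversionSignsGo ("-" :: "-" :: v :: r'') 0
              = conversionSignsGo ("+" :: v :: r'') 0 := by
            conv_lhs => rw [conversionSignsGo]
            simp
          rw [hA, ih _ (by simp at h ⊢; omega) hp'']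
          simp [List.foldl_cons, conversionSignsStep]
        · -- t is not "-"; if t = "+" then "+-" collapses to "-", else advance
          by_cases hq : t = "+"
          · subst hq; subst hu
            have hr' : r' ≠ [] := by
              intro e; subst e
              exact hp.2 (by simp)
            obtain ⟨v, r'', rfl⟩ := List.exists_cons_of_ne_nil hr'
            have hp'' : Pre_conversion_signs ("-" :: v :: r'') := by
              unfold Pre_conversion_signs at hp' ⊢
              rwa [List.getLast?_cons_cons] at hp' ⊢
            have hA : conversionSignsGo ("+" :: "-" :: v :: r'') 0
                = conversionSignsGo ("-" :: v :: r'') 0 := by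
              conv_lhs => rw [conversionSignsGo]
              simp
            rw [hA, ih _ (by simp at h ⊢; omega) hp'']
            simp [List.foldl_cons, conversionSignsStep]
          · -- advance: t is not a sign
            subst hu
            have hA : conversionSignsGo (t :: "-" :: r') 0
                = conversionSignsGo (t :: "-" :: r') (0 + 1) := by
              conv_lhs => rw [conversionSignsGo]
              simp [ht, hq]
            rw [hA, conversionSignsGo_cons, ih _ (by simp at h ⊢; omega) hp']
            have hs : conversionSignsStep [t] "-" = [t, "-"] := by
              unfold conversionSignsStep; simp [ht, hq]
            simp only [List.foldl_cons, conversionSignsStep_nil, hs]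
            rw [show ([t, "-"] : List String) = [t] ++ ["-"] from rfl,
              foldl_conversionSignsStep_append r' [t] ["-"] (by simp)]
            rfl
      · -- u is not "-": no collapse at the front, advance
        have hA : conversionSignsGo (t :: u :: r') 0
            = conversionSignsGo (t :: u :: r') (0 + 1) := by
          conv_lhs => rw [conversionSignsGo]
          simp [hu]
        rw [hA, conversionSignsGo_cons, ih _ (by simp at h ⊢; omega) hp']
        have hs : conversionSignsStep [t] u = [t, u] := by
          unfold conversionSignsStep; simp [hu]
        simp only [List.foldl_cons, conversionSignsStep_nil, hs]
        rw [show ([t, u] : List String) = [t] ++ [u] from rfl,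
          foldl_conversionSignsStep_append r' [t] [u] (by simp)]
        rfl

theorem conversionSigns_main (r : List String) (hp : Pre_conversion_signs r) :
    conversionSignsGo r 0 = r.foldl conversionSignsStep [] :=
  conversionSigns_main_aux r.length r (Nat.le_refl _) hp

-- ===== VERDICT (by name: the statement is the Claim_ definition above) =====
theorem conversion_signs_spec : Claim_equal_conversion_signs := by
  intro s _ hp
  unfold Spec_conversion_signs conversion_signs conversion_signs_alt
  exact conversionSigns_main s hp
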